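-- pv_equiv track=rewrite | github.com/shashank-acquia/sf-hive-discrepancy-agent | mcp_integration/mcp_enhanced_search_agent.py | _sanitize_query_for_cql
-- ===== SOURCE A (Python) =====
-- def _sanitize_query_for_cql(query: str) -> str:
--     """Sanitize query for Confluence CQL"""
--     # Escape special characters that can break CQL
--     # Remove or escape problematic characters
--     sanitized = query.replace('"', '\\"')  # Escape quotes
--     sanitized = sanitized.replace("'", "\\'")  # Escape single quotes
--
--     # Remove characters that commonly cause parsing issues
--     problematic_chars = ['(', ')', '[', ']', '{', '}', '~', '!', '@', '#', '$', '%', '^', '&', '*']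
--     for char in problematic_chars:
--         sanitized = sanitized.replace(char, ' ')
--
--     # Clean up multiple spaces
--     sanitized = ' '.join(sanitized.split())
--
--     return sanitized
-- ===== SOURCE B (Python) =====
-- def _sanitize_query_for_cql(query: str) -> str:
--     """Sanitize query for Confluence CQL (single-pass rewrite)."""
--     problematic = {'(', ')', '[', ']', '{', '}', '~', '!', '@', '#', '$', '%', '^', '&', '*'}
--     pieces = []
--     for ch in query:
--         if ch == '"':
--             pieces.append('\\"')
--         elif ch == "'":
--             pieces.append("\\'")
--         elif ch in problematic:
--             pieces.append(' ')
--         else: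
--             pieces.append(ch)
--     return ' '.join(''.join(pieces).split())
-- ===== Notes on version B (the rewrite author's own statement) =====
-- stated objective: alternative
-- what changed: Replaced seventeen sequential str.replace passes over the string with one character-by-character pass that emits the escaped or substituted piece for each character, followed by the identical whitespace-collapsing join-of-split step.
import Mathlib
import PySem

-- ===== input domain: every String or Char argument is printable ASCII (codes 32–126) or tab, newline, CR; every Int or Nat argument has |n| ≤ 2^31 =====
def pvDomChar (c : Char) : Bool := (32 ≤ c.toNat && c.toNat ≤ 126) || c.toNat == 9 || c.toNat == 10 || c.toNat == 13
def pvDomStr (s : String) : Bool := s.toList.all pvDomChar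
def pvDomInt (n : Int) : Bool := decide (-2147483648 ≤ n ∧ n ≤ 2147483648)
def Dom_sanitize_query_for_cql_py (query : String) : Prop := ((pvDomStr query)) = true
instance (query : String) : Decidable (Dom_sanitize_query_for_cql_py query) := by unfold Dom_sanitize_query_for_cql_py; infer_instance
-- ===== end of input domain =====

-- B builds the result in one character-by-character pass instead of A's seventeen sequential replace passes; same final whitespace collapse.

-- ===== PORT A =====
-- literal transliteration: two escape replaces, a loop of replaces over the problematic chars, then ' '.join(s.split())
def sanitize_query_for_cql_py (query : String) : String :=
  let sanitized := PySem.Str.replace query "\"" "\\\""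
  let sanitized := PySem.Str.replace sanitized "'" "\\'"
  let problematic_chars : List String := ["(", ")", "[", "]", "{", "}", "~", "!", "@", "#", "$", "%", "^", "&", "*"]
  let sanitized := problematic_chars.foldl (fun s c => PySem.Str.replace s c " ") sanitized
  PySem.Str.join " " (PySem.Str.split₀ sanitized)

-- ===== PORT B =====
-- per-character escape (B's if/elif chain; the set membership test is the list-membership test)
def cqlEscapeChar (c : Char) : List Char :=
  if c = '"' then ['\\', '"']
  else if c = '\'' then ['\\', '\'']
  else if c ∈ ['(', ')', '[', ']', '{', '}', '~', '!', '@', '#', '$', '%', '^', '&', '*'] then [' ']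
  else [c]

def sanitize_query_for_cql_py_alt (query : String) : String :=
  let pieces := query.toList.flatMap cqlEscapeChar
  PySem.Str.join " " (PySem.Str.split₀ (String.ofList pieces))

-- ===== PRECONDITION & SPEC =====
def Spec_sanitize_query_for_cql_py (query : String) (out : String) : Prop := out = sanitize_query_for_cql_py_alt query
instance (query : String) (out : String) : Decidable (Spec_sanitize_query_for_cql_py query out) := by unfold Spec_sanitize_query_for_cql_py; infer_instance

-- ===== CLAIM (what is proved, stated in full; the proofs are below) =====
def Claim_equal_sanitize_query_for_cql_py : Prop := ∀ (query : String), Dom_sanitize_query_for_cql_py query → Spec_sanitize_query_for_cql_py query (sanitize_query_for_cql_py query)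

-- ===== LEMMAS AND PROOFS =====

-- substitution of one character, as a flatMap
def sub1 (a : Char) (r : List Char) (l : List Char) : List Char :=
  l.flatMap (fun c => if c = a then r else [c])

theorem replace_go_single (a : Char) (new : List Char) :
    ∀ (fuel : Nat) (l acc : List Char), l.length ≤ fuel →
    PySem.Chars.replace.go [a] new fuel l acc
      = acc.reverse ++ l.flatMap (fun c => if c = a then new else [c]) := by
  intro fuel
  induction fuel with
  | zero =>
    intro l acc h
    have : l = [] := List.eq_nil_of_length_eq_zero (Nat.le_zero.mp h)
    subst this
    simp [PySem.Chars.replace.go]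
  | succ n ih =>
    intro l acc h
    cases l with
    | nil => simp [PySem.Chars.replace.go]
    | cons c t =>
      rw [PySem.Chars.replace.go]
      by_cases hc : c = a
      · subst hc
        have hp : List.isPrefixOf [c] (c :: t) = true := by
          simp [List.isPrefixOf]
        simp only [hp]
        rw [if_pos trivial]
        rw [ih _ _ (by simpa using Nat.le_of_succ_le_succ h)]
        simp
      · have hp : List.isPrefixOf [a] (c :: t) = false := by
          simp only [List.isPrefixOf, Bool.and_true,
            beq_eq_false_iff_ne, ne_eq]
          exact fun hh => hc hh.symm
        simp only [hp, Bool.false_eq_true, if_false]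
        rw [ih _ _ (by simpa using Nat.le_of_succ_le_succ h)]
        simp [hc]

theorem replace_single (s : List Char) (a : Char) (new : List Char) :
    PySem.Chars.replace s [a] new = sub1 a new s := by
  rw [PySem.Chars.replace]
  rw [if_neg (by simp)]
  exact replace_go_single a new s.length s [] (le_refl _)

theorem sub1_flatMap (a : Char) (r : List Char) (f : Char → List Char) (s : List Char) :
    sub1 a r (s.flatMap f) = s.flatMap (fun c => sub1 a r (f c)) := by
  induction s with
  | nil => simp [sub1]
  | cons c t ih =>
    simp only [List.flatMap_cons]
    rw [show sub1 a r (f c ++ t.flatMap f) = sub1 a r (f c) ++ sub1 a r (t.flatMap f) by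
      simp [sub1, List.flatMap_append]]
    rw [ih]

-- pointwise: A's seventeen substitutions composed on one character equal B's escape
theorem chain_pointwise (c : Char) :
    sub1 '*' [' '] (sub1 '&' [' '] (sub1 '^' [' '] (sub1 '%' [' '] (sub1 '$' [' ']
      (sub1 '#' [' '] (sub1 '@' [' '] (sub1 '!' [' '] (sub1 '~' [' '] (sub1 '}' [' ']
      (sub1 '{' [' '] (sub1 ']' [' '] (sub1 '[' [' '] (sub1 ')' [' '] (sub1 '(' [' ']
      (sub1 '\'' ['\\', '\''] (sub1 '"' ['\\', '"'] [c]))))))))))))))))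
      = cqlEscapeChar c := by
  by_cases h1 : c = '"'
  · subst h1; decide
  by_cases h2 : c = '\''
  · subst h2; decide
  by_cases h3 : c = '('
  · subst h3; decide
  by_cases h4 : c = ')'
  · subst h4; decide
  by_cases h5 : c = '['
  · subst h5; decide
  by_cases h6 : c = ']'
  · subst h6; decide
  by_cases h7 : c = '{'
  · subst h7; decide
  by_cases h8 : c = '}'
  · subst h8; decide
  by_cases h9 : c = '~'
  · subst h9; decide
  by_cases h10 : c = '!'
  · subst h10; decide
  by_cases h11 : c = '@'
  · subst h11; decide
  by_cases h12 : c = '#'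
  · subst h12; decide
  by_cases h13 : c = '$'
  · subst h13; decide
  by_cases h14 : c = '%'
  · subst h14; decide
  by_cases h15 : c = '^'
  · subst h15; decide
  by_cases h16 : c = '&'
  · subst h16; decide
  by_cases h17 : c = '*'
  · subst h17; decide
  simp [sub1, cqlEscapeChar, h1, h2, h3, h4, h5, h6, h7, h8, h9, h10,
    h11, h12, h13, h14, h15, h16, h17]

-- A's chained replaces over the whole character list equal B's single flatMap
theorem chain_eq_flatMap (s : List Char) :
    sub1 '*' [' '] (sub1 '&' [' '] (sub1 '^' [' '] (sub1 '%' [' '] (sub1 '$' [' ']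
      (sub1 '#' [' '] (sub1 '@' [' '] (sub1 '!' [' '] (sub1 '~' [' '] (sub1 '}' [' ']
      (sub1 '{' [' '] (sub1 ']' [' '] (sub1 '[' [' '] (sub1 ')' [' '] (sub1 '(' [' ']
      (sub1 '\'' ['\\', '\''] (sub1 '"' ['\\', '"'] s))))))))))))))))
      = s.flatMap cqlEscapeChar := by
  have hbase : sub1 '"' ['\\', '"'] s = s.flatMap (fun c => sub1 '"' ['\\', '"'] [c]) := by
    simp [sub1]
  rw [hbase]
  rw [sub1_flatMap, sub1_flatMap, sub1_flatMap, sub1_flatMap, sub1_flatMap, sub1_flatMap,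
    sub1_flatMap, sub1_flatMap, sub1_flatMap, sub1_flatMap, sub1_flatMap, sub1_flatMap,
    sub1_flatMap, sub1_flatMap, sub1_flatMap, sub1_flatMap]
  exact List.flatMap_congr (fun c _ => chain_pointwise c)

-- ===== VERDICT (by name: the statement is the Claim_ definition above) =====
theorem sanitize_query_for_cql_py_spec : Claim_equal_sanitize_query_for_cql_py := by
  intro query _
  unfold Spec_sanitize_query_for_cql_py sanitize_query_for_cql_py sanitize_query_for_cql_py_alt
  dsimp only
  simp only [List.foldl_cons, List.foldl_nil]
  refine congrArg _ (congrArg _ ?_)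
  refine congrArg String.ofList ?_
  simp only [PySem.Str.toList_replace]
  rw [show ("\"" : String).toList = ['"'] from rfl,
    show ("\\\"" : String).toList = ['\\', '"'] from rfl,
    show ("'" : String).toList = ['\''] from rfl,
    show ("\\'" : String).toList = ['\\', '\''] from rfl,
    show ("(" : String).toList = ['('] from rfl,
    show (")" : String).toList = [')'] from rfl,
    show ("[" : String).toList = ['['] from rfl,
    show ("]" : String).toList = [']'] from rfl,
    show ("{" : String).toList = ['{'] from rfl,
    show ("}" : String).toList = ['}'] from rfl,
    show ("~" : String).toList = ['~'] from rfl,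
    show ("!" : String).toList = ['!'] from rfl,
    show ("@" : String).toList = ['@'] from rfl,
    show ("#" : String).toList = ['#'] from rfl,
    show ("$" : String).toList = ['$'] from rfl,
    show ("%" : String).toList = ['%'] from rfl,
    show ("^" : String).toList = ['^'] from rfl,
    show ("&" : String).toList = ['&'] from rfl,
    show ("*" : String).toList = ['*'] from rfl,
    show (" " : String).toList = [' '] from rfl]
  simp only [replace_single]
  exact chain_eq_flatMap query.toList
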